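-- pv_equiv track=rewrite | github.com/aaa2ppp/ya-algo-training8-pub | less3/f/main.py | solve
-- ===== SOURCE A (Python) =====
-- from collections import defaultdict
--
-- def solve(parent, queries):
--     n = len(parent)
--     m = len(queries)
--     ans = [0] * m
--
--     # Строим мапу вопросов: для каждого узла — список запросов вида (индекс_запроса, предок)
--     query_map = defaultdict(list)
--     for i, (a, b) in enumerate(queries):
--         query_map[b].append((i, a))
--
--     # Строим дерево
--     tree = [[] for _ in range(n)]
--     for node in range(1, n):
--         tree[parent[node]].append(node)
--
--     # Множество текущих предков в DFS
--     current_ancestors = set()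
--
--     def dfs(node):
--         # Отвечаем на все запросы, где текущий узел — это "b"
--         if node in query_map:
--             for idx, ancestor in query_map[node]:
--                 if ancestor in current_ancestors:
--                     ans[idx] = 1
--
--         current_ancestors.add(node)
--         for child in tree[node]:
--             dfs(child)
--         current_ancestors.discard(node)
--
--     # Запускаем DFS от всех корней (у которых parent[node] == 0)
--     for node in range(1, n):
--         if parent[node] == 0:
--             dfs(node)
--
--     return ans
-- ===== SOURCE B (Python) =====
-- def solve(parent, queries):
--     # Precompute each node's ancestor set in one DFS, then answer queries in O(1).
--     n = len(parent)
--     children = [[] for _ in range(n)]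
--     for v in range(1, n):
--         children[parent[v]].append(v)
--
--     ancestors = {}
--
--     def dfs(v, anc):
--         ancestors[v] = anc
--         for c in children[v]:
--             dfs(c, anc | {v})
--
--     for r in range(1, n):
--         if parent[r] == 0:
--             dfs(r, set())
--
--     return [1 if b in ancestors and a in ancestors[b] else 0 for a, b in queries]
-- ===== Notes on version B (the rewrite author's own statement) =====
-- stated objective: alternative
-- what changed: Replaces A's online query answering during the DFS (a live current_ancestors set plus a query map grouped by target node, writing into a shared answer array mid-traversal) with a precomputation pass: one DFS stores each visited node's full ancestor set in a dictionary, after which every query is answered independently by two O(1) set/dict lookups.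
import Mathlib
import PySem

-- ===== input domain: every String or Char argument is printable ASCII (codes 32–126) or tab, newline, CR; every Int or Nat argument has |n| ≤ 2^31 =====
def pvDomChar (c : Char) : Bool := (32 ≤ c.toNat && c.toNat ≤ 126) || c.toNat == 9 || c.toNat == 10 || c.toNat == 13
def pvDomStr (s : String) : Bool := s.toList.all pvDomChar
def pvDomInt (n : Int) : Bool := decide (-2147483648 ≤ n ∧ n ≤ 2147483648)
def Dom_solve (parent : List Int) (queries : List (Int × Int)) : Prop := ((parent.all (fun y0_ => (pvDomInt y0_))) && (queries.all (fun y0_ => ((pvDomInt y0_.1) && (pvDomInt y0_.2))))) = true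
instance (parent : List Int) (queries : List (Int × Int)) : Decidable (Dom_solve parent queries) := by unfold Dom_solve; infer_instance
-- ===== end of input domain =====

-- B precomputes each visited node's ancestor set in one DFS and then answers every query by
-- two O(1) lookups, instead of A's online answering during the DFS (live ancestor set + query
-- map); return values agree on all inputs where A does not raise.

-- ===== PORT A =====
-- query_map: defaultdict(list); query_map[b].append((i, a))
def qmapA (queries : List (Int × Int)) : PySem.Dict Int (List (Int × Int)) :=
  (PySem.List.enumerate queries).foldl
    (fun d p => d.modify p.2.2 [] (fun l => l ++ [(p.1, p.2.1)])) PySem.Dict.empty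

-- tree = [[] for _ in range(n)]; for node in range(1, n): tree[parent[node]].append(node)
def treeA (parent : List Int) : List (List Int) :=
  (PySem.List.pyRange 1 (parent.length : Int) 1).foldl
    (fun t node =>
      let p := PySem.List.pyGetD parent node 0
      PySem.List.pySetD t p (PySem.List.pyGetD t p [] ++ [node]))
    (List.replicate parent.length ([] : List Int))

-- def dfs(node): answer queries at node, add node, recurse into children, discard node
-- (fuel bounds the recursion depth; a DFS path from a root has at most n nodes)
def dfsA (tree : List (List Int)) (qmap : PySem.Dict Int (List (Int × Int))) :
    Nat → Int → (PySem.Set Int × List Int) → (PySem.Set Int × List Int)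
  | 0, _, st => st
  | f+1, node, st =>
    let ans1 : List Int :=
      match qmap.get? node with
      | some l => l.foldl (fun a p => if PySem.Set.contains st.1 p.2 then a.set p.1.toNat 1 else a) st.2
      | none => st.2
    let cur1 := PySem.Set.add st.1 node
    let st2 := (PySem.List.pyGetD tree node []).foldl (fun s c => dfsA tree qmap f c s) (cur1, ans1)
    (PySem.Set.discard st2.1 node, st2.2)

def solve (parent : List Int) (queries : List (Int × Int)) : List Int :=
  let n := parent.length
  let ans := List.replicate queries.length (0 : Int)
  let qmap := qmapA queries
  let tree := treeA parent
  let st := (PySem.List.pyRange 1 (n : Int) 1).foldl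
    (fun st node => if PySem.List.pyGetD parent node 0 = 0 then dfsA tree qmap n node st else st)
    (([] : PySem.Set Int), ans)
  st.2

-- ===== PORT B =====
-- children = [[] for _ in range(n)]; for v in range(1, n): children[parent[v]].append(v)
def childrenB (parent : List Int) : List (List Int) :=
  (PySem.List.pyRange 1 (parent.length : Int) 1).foldl
    (fun t v =>
      let p := PySem.List.pyGetD parent v 0
      PySem.List.pySetD t p (PySem.List.pyGetD t p [] ++ [v]))
    (List.replicate parent.length ([] : List Int))

-- def dfs(v, anc): ancestors[v] = anc; for c in children[v]: dfs(c, anc | {v})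
-- (fuel bounds the recursion depth; a DFS path from a root has at most n nodes)
def dfsB (tree : List (List Int)) :
    Nat → Int → PySem.Set Int → PySem.Dict Int (PySem.Set Int) → PySem.Dict Int (PySem.Set Int)
  | 0, _, _, d => d
  | f+1, v, anc, d =>
    let d1 := d.insert v anc
    (PySem.List.pyGetD tree v []).foldl
      (fun dd c => dfsB tree f c (PySem.Set.union anc [v]) dd) d1

def solve_alt (parent : List Int) (queries : List (Int × Int)) : List Int :=
  let n := parent.length
  let tree := childrenB parent
  let ancestors := (PySem.List.pyRange 1 (n : Int) 1).foldl
    (fun d r => if PySem.List.pyGetD parent r 0 = 0 then dfsB tree n r ([] : PySem.Set Int) d else d)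
    PySem.Dict.empty
  queries.map (fun q =>
    match ancestors.get? q.2 with
    | some s => if PySem.Set.contains s q.1 then (1 : Int) else 0
    | none => 0)

-- ===== PRECONDITION & SPEC =====
-- Pre_ excludes exactly the inputs where A raises IndexError: some parent[node] (1 ≤ node < n)
-- outside [-n, n) used as a list index in tree[parent[node]].
def Pre_solve (parent : List Int) (queries : List (Int × Int)) : Prop :=
  ∀ i : Nat, i < parent.length → 1 ≤ i → PySem.Raise.InRange parent.length (parent.getD i 0)
instance (parent : List Int) (queries : List (Int × Int)) : Decidable (Pre_solve parent queries) := by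
  unfold Pre_solve; infer_instance

def pvWitness_solve : List Int × (List (Int × Int)) := ([0, 0, 1], [(1, 2), (2, 1), (0, 1)])

def Spec_solve (parent : List Int) (queries : List (Int × Int)) (out : List Int) : Prop := out = solve_alt parent queries
instance (parent : List Int) (queries : List (Int × Int)) (out : List Int) : Decidable (Spec_solve parent queries out) := by unfold Spec_solve; infer_instance

-- ===== CLAIM (what is proved, stated in full; the proofs are below) =====
def Claim_equal_solve : Prop := ∀ (parent : List Int) (queries : List (Int × Int)), Dom_solve parent queries → Pre_solve parent queries → Spec_solve parent queries (solve parent queries)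

-- ===== LEMMAS AND PROOFS =====

-- raw parent value and normalized (Python-wraparound) parent index of a node
def rawP (parent : List Int) (v : Int) : Int := PySem.List.pyGetD parent v 0
def peP (parent : List Int) (v : Int) : Int :=
  if rawP parent v < 0 then rawP parent v + (parent.length : Int) else rawP parent v

-- valid node id (node 0 is never visited)
def Nd (parent : List Int) (v : Int) : Prop := 1 ≤ v ∧ v < (parent.length : Int)

-- C = [pe v, pe² v, …, r] is v's strict-ancestor chain ending at a root r (parent[r] == 0)
def RootChain (parent : List Int) : Int → List Int → Prop
  | v, [] => Nd parent v ∧ rawP parent v = 0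
  | v, c :: C => Nd parent v ∧ peP parent v = c ∧ RootChain parent c C

-- L = [pe b, …, v]: b is a descendant of v through valid nodes (L = [] means b = v)
def Chain (parent : List Int) : Int → List Int → Int → Prop
  | b, [], v => b = v
  | b, x :: L, v => Nd parent b ∧ peP parent b = x ∧ Chain parent x L v

-- query j is answered 1 inside the dfs of v with ancestor context C
def HitV (parent : List Int) (queries : List (Int × Int)) (v : Int) (C : List Int) (j : Nat) : Prop :=
  ∃ a b L, queries[j]? = some (a, b) ∧ Chain parent b L v ∧ (a ∈ C ∨ a ∈ L)

-- the answer to query (a, b) is 1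
def QAp (parent : List Int) (a b : Int) : Prop := ∃ C, RootChain parent b C ∧ a ∈ C

lemma pyIdx_norm (n : Nat) (p : Int) (h1 : -(n : Int) ≤ p) (h2 : p < (n : Int)) :
    PySem.List.pyIdx? n p = some (if p < 0 then p + n else p).toNat := by
  simp only [PySem.List.pyIdx?]
  split_ifs with h3 h4 h5 <;> simp_all <;> omega

lemma pyGetD_norm {α : Type} (xs : List α) (p : Int) (d : α)
    (h1 : -(xs.length : Int) ≤ p) (h2 : p < (xs.length : Int)) :
    PySem.List.pyGetD xs p d = xs.getD (if p < 0 then p + xs.length else p).toNat d := by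
  simp only [PySem.List.pyGetD, PySem.List.pyGet?, pyIdx_norm xs.length p h1 h2, Option.bind]
  rfl

lemma pySetD_norm {α : Type} (xs : List α) (p : Int) (v : α)
    (h1 : -(xs.length : Int) ≤ p) (h2 : p < (xs.length : Int)) :
    PySem.List.pySetD xs p v = xs.set (if p < 0 then p + xs.length else p).toNat v := by
  simp only [PySem.List.pySetD, PySem.List.pySet?, pyIdx_norm xs.length p h1 h2, Option.map]
  rfl

lemma rawP_natCast (parent : List Int) (i : Nat) : rawP parent (i : Int) = parent.getD i 0 := by
  simp [rawP]

-- under Pre_, the normalized parent of a valid node is a list index in [0, n)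
lemma peP_bounds (parent : List Int) (queries : List (Int × Int)) (hp : Pre_solve parent queries)
    (v : Int) (hv : Nd parent v) : 0 ≤ peP parent v ∧ peP parent v < (parent.length : Int) := by
  obtain ⟨h1, h2⟩ := hv
  have hv' : v = ((v.toNat : Nat) : Int) := by omega
  have hlt : v.toNat < parent.length := by omega
  have hr := hp v.toNat hlt (by omega)
  simp only [PySem.Raise.InRange] at hr
  have : rawP parent v = parent.getD v.toNat 0 := by
    conv_lhs => rw [hv']
    rw [rawP_natCast]
  simp only [peP, this]
  split_ifs <;> omega

lemma RootChain_Nd (parent : List Int) (v : Int) (C : List Int) (h : RootChain parent v C) :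
    Nd parent v := by cases C <;> exact h.1

lemma RootChain_mem_Nd (parent : List Int) :
    ∀ (C : List Int) (v x : Int), RootChain parent v C → x ∈ v :: C → Nd parent x := by
  intro C
  induction C with
  | nil => intro v x h hx; simp at hx; subst hx; exact h.1
  | cons c C ih =>
    intro v x h hx
    rcases List.mem_cons.mp hx with h1 | h1
    · subst h1; exact h.1
    · exact ih c x h.2.2 h1

lemma RootChain_unique (parent : List Int) :
    ∀ (C C' : List Int) (v : Int), RootChain parent v C → RootChain parent v C' → C = C' := by
  intro C
  induction C with
  | nil =>
    intro C' v h h'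
    cases C' with
    | nil => rfl
    | cons c C' =>
      exfalso
      have hc : Nd parent c := RootChain_Nd parent c C' h'.2.2
      have : peP parent v = 0 := by simp [peP, h.2]
      have := h'.2.1
      obtain ⟨hc1, _⟩ := hc
      omega
  | cons c C ih =>
    intro C' v h h'
    cases C' with
    | nil =>
      exfalso
      have hc : Nd parent c := RootChain_Nd parent c C h.2.2
      have : peP parent v = 0 := by simp [peP, h'.2]
      have := h.2.1
      obtain ⟨hc1, _⟩ := hc
      omega
    | cons c' C'' =>
      have hcc : c = c' := by rw [← h.2.1, ← h'.2.1]
      subst hcc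
      rw [ih C'' c h.2.2 h'.2.2]

lemma RootChain_suffix (parent : List Int) :
    ∀ (C1 : List Int) (v x : Int) (C2 : List Int),
      RootChain parent v (C1 ++ x :: C2) → RootChain parent x C2 := by
  intro C1
  induction C1 with
  | nil => intro v x C2 h; exact h.2.2
  | cons c C1 ih => intro v x C2 h; exact ih c x C2 h.2.2

lemma RootChain_not_mem (parent : List Int) (v : Int) (C : List Int)
    (h : RootChain parent v C) : v ∉ C := by
  intro hv
  obtain ⟨C1, C2, rfl⟩ := List.append_of_mem hv
  have h2 := RootChain_suffix parent C1 v v C2 h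
  have := RootChain_unique parent (C1 ++ v :: C2) C2 v h h2
  have hl : (C1 ++ v :: C2).length = C2.length := by rw [this]
  simp at hl
  omega

lemma RootChain_nodup (parent : List Int) :
    ∀ (C : List Int) (v : Int), RootChain parent v C → (v :: C).Nodup := by
  intro C
  induction C with
  | nil => intro v h; simp
  | cons c C ih =>
    intro v h
    have hnd := ih c h.2.2
    exact List.nodup_cons.mpr ⟨RootChain_not_mem parent v (c :: C) h, hnd⟩

-- a nodup list of valid nodes has at most n - 1 elements
lemma nodup_valid_length (parent : List Int) (l : List Int) (hnd : l.Nodup) (hne : l ≠ [])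
    (hv : ∀ x ∈ l, Nd parent x) : l.length + 1 ≤ parent.length := by
  have hsub : l ⊆ PySem.List.pyRange 1 (parent.length : Int) 1 := by
    intro x hx
    rw [PySem.List.mem_pyRange_one]
    exact (hv x hx)
  have := (List.subperm_of_subset hnd hsub).length_le
  rw [PySem.List.length_pyRange_one] at this
  obtain ⟨x, hx⟩ := List.exists_mem_of_ne_nil l hne
  have := hv x hx
  obtain ⟨h1, h2⟩ := this
  omega

lemma Chain_snoc_build (parent : List Int) :
    ∀ (L : List Int) (b c v : Int), Chain parent b L c → Nd parent c → peP parent c = v →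
      Chain parent b (L ++ [v]) v := by
  intro L
  induction L with
  | nil =>
    intro b c v h hc hpe
    cases h
    exact ⟨hc, hpe, rfl⟩
  | cons x L ih =>
    intro b c v h hc hpe
    exact ⟨h.1, h.2.1, ih x c v h.2.2 hc hpe⟩

lemma Chain_snoc_destruct (parent : List Int) :
    ∀ (L : List Int) (b v : Int), Chain parent b L v →
      L = [] ∨ ∃ c L', L = L' ++ [v] ∧ Chain parent b L' c ∧ Nd parent c ∧ peP parent c = v := by
  intro L
  induction L with
  | nil => intro b v h; left; rfl
  | cons x L ih =>
    intro b v h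
    right
    obtain ⟨hb, hpe, hch⟩ := h
    rcases ih x v hch with rfl | ⟨c, L', rfl, hch', hc, hpec⟩
    · cases hch
      exact ⟨b, [], by simp, rfl, hb, hpe⟩
    · exact ⟨c, x :: L', by simp, ⟨hb, hpe, hch'⟩, hc, hpec⟩

lemma Chain_Root_to_RootChain (parent : List Int) :
    ∀ (L : List Int) (b r : Int), Chain parent b L r → Nd parent r → rawP parent r = 0 →
      RootChain parent b L := by
  intro L
  induction L with
  | nil => intro b r h hr hraw; cases h; exact ⟨hr, hraw⟩
  | cons x L ih =>
    intro b r h hr hraw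
    exact ⟨h.1, h.2.1, ih x r h.2.2 hr hraw⟩

lemma RootChain_last (parent : List Int) :
    ∀ (C : List Int) (b : Int), RootChain parent b C →
      ∃ r, Nd parent r ∧ rawP parent r = 0 ∧ Chain parent b C r := by
  intro C
  induction C with
  | nil => intro b h; exact ⟨b, h.1, h.2, rfl⟩
  | cons c C ih =>
    intro b h
    obtain ⟨r, hr1, hr2, hr3⟩ := ih c h.2.2
    exact ⟨r, hr1, hr2, h.1, h.2.1, hr3⟩

lemma Chain_append_RootChain (parent : List Int) :
    ∀ (L : List Int) (b v : Int) (C : List Int),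
      Chain parent b L v → RootChain parent v C → RootChain parent b (L ++ C) := by
  intro L
  induction L with
  | nil => intro b v C h hRC; cases h; simpa using hRC
  | cons x L ih =>
    intro b v C h hRC
    exact ⟨h.1, h.2.1, ih x v C h.2.2 hRC⟩

-- ===== characterizations of A's data structures =====

lemma enumerate_mem {α : Type} (xs : List α) :
    ∀ (s : Int) (p : Int × α), p ∈ PySem.List.enumerate xs s ↔
      ∃ j : Nat, xs[j]? = some p.2 ∧ p.1 = s + j := by
  induction xs with
  | nil => intro s p; simp [PySem.List.enumerate]
  | cons x t ih =>
    intro s p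
    simp only [PySem.List.enumerate, List.mem_cons, ih (s + 1)]
    constructor
    · rintro (rfl | ⟨j, hj, hp⟩)
      · exact ⟨0, by simp⟩
      · exact ⟨j + 1, by simpa using hj, by push_cast; omega⟩
    · rintro ⟨j, hj, hp⟩
      cases j with
      | zero =>
        left
        simp at hj hp
        obtain ⟨p1, p2⟩ := p
        simp_all
      | succ j =>
        right
        exact ⟨j, by simpa using hj, by push_cast at hp ⊢; omega⟩

lemma qmapA_getD (queries : List (Int × Int)) (b : Int) :
    (qmapA queries).getD b [] =
      ((PySem.List.enumerate queries).filter (fun p => p.2.2 == b)).map (fun p => (p.1, p.2.1)) := by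
  have h1 : qmapA queries =
      ((PySem.List.enumerate queries).map (fun p => (p.2.2, (p.1, p.2.1)))).foldl
        (fun d q => d.modify q.1 [] (fun l => l ++ [q.2])) PySem.Dict.empty := by
    rw [List.foldl_map]
    rfl
  rw [h1, PySem.Dict.getD_foldl_modify_append]
  simp [PySem.Dict.getD_empty, List.filter_map, List.map_map, Function.comp_def]

def childList (parent : List Int) (v : Int) : List Int :=
  (PySem.List.pyRange 1 (parent.length : Int) 1).filter (fun x => decide (peP parent x = v))

lemma getD_set {α : Type} (t : List α) (i p : Nat) (v d : α) (hi : i < t.length) :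
    (t.set i v).getD p d = if i = p then v else t.getD p d := by
  simp only [List.getD_eq_getElem?_getD, List.getElem?_set, hi]
  by_cases h : i = p
  · subst h; simp
  · simp [h]

lemma tree_fold (parent : List Int) (queries : List (Int × Int)) (hp : Pre_solve parent queries) :
    ∀ (L : List Int), (∀ x ∈ L, Nd parent x) → ∀ (t : List (List Int)), t.length = parent.length →
      ((L.foldl (fun t node =>
          let p := PySem.List.pyGetD parent node 0
          PySem.List.pySetD t p (PySem.List.pyGetD t p [] ++ [node])) t).length = parent.length) ∧
      ∀ p : Nat, p < parent.length →
        (L.foldl (fun t node =>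
          let p := PySem.List.pyGetD parent node 0
          PySem.List.pySetD t p (PySem.List.pyGetD t p [] ++ [node])) t).getD p []
          = t.getD p [] ++ L.filter (fun x => decide (peP parent x = (p : Int))) := by
  intro L
  induction L with
  | nil => intro _ t ht; simpa using ht
  | cons x L ih =>
    intro hL t ht
    have hx : Nd parent x := hL x (List.mem_cons_self)
    have hb := peP_bounds parent queries hp x hx
    have hraw : rawP parent x < (parent.length : Int) ∧ -(parent.length : Int) ≤ rawP parent x := by
      simp only [peP] at hb
      split_ifs at hb <;> omega
    have hstep : (fun t node =>
          let p := PySem.List.pyGetD parent node 0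
          PySem.List.pySetD t p (PySem.List.pyGetD t p [] ++ [node])) t x
        = t.set (peP parent x).toNat (t.getD (peP parent x).toNat [] ++ [x]) := by
      show PySem.List.pySetD t (rawP parent x) (PySem.List.pyGetD t (rawP parent x) [] ++ [x])
          = t.set (peP parent x).toNat (t.getD (peP parent x).toNat [] ++ [x])
      rw [pySetD_norm t _ _ (by omega) (by omega), pyGetD_norm t _ _ (by omega) (by omega)]
      simp only [peP, rawP, ht]
    have hidx : (peP parent x).toNat < t.length := by omega
    have ht' : (t.set (peP parent x).toNat (t.getD (peP parent x).toNat [] ++ [x])).length = parent.length := by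
      simp [ht]
    obtain ⟨ihlen, ihget⟩ := ih (fun y hy => hL y (List.mem_cons_of_mem x hy)) _ ht'
    constructor
    · simp only [List.foldl_cons, hstep]; exact ihlen
    · intro p hplt
      simp only [List.foldl_cons, hstep]
      rw [ihget p hplt]
      rw [getD_set t _ p _ [] hidx]
      simp only [List.filter_cons]
      by_cases hc : peP parent x = (p : Int)
      · have : (peP parent x).toNat = p := by omega
        simp [hc]
      · have : ¬ (peP parent x).toNat = p := by omega
        simp [hc, this]

lemma treeA_length (parent : List Int) (queries : List (Int × Int)) (hp : Pre_solve parent queries) :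
    (treeA parent).length = parent.length := by
  have := (tree_fold parent queries hp (PySem.List.pyRange 1 (parent.length : Int) 1)
    (fun x hx => by
      rw [PySem.List.mem_pyRange_one] at hx
      exact hx)
    (List.replicate parent.length []) (by simp)).1
  simpa [treeA] using this

lemma treeA_get (parent : List Int) (queries : List (Int × Int)) (hp : Pre_solve parent queries)
    (v : Int) (h0 : 0 ≤ v) (h1 : v < (parent.length : Int)) :
    PySem.List.pyGetD (treeA parent) v [] = childList parent v := by
  have hlen := treeA_length parent queries hp
  have hget := (tree_fold parent queries hp (PySem.List.pyRange 1 (parent.length : Int) 1)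
    (fun x hx => by
      rw [PySem.List.mem_pyRange_one] at hx
      exact hx)
    (List.replicate parent.length []) (by simp)).2
  rw [pyGetD_norm (treeA parent) v [] (by omega) (by omega)]
  have hneg : ¬ v < 0 := by omega
  simp only [hneg, if_false, hlen]
  have hvt : v.toNat < parent.length := by omega
  have := hget v.toNat hvt
  have hrw : (treeA parent).getD v.toNat [] =
      (List.replicate parent.length ([] : List Int)).getD v.toNat []
        ++ (PySem.List.pyRange 1 (parent.length : Int) 1).filter
            (fun x => decide (peP parent x = (v.toNat : Int))) := by
    simpa [treeA] using this
  rw [hrw]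
  have hcast : ((v.toNat : Nat) : Int) = v := by omega
  simp [childList, hcast]

-- members of the per-node query list
lemma qlist_mem (queries : List (Int × Int)) (v : Int) (q : Int × Int) :
    q ∈ (qmapA queries).getD v [] ↔
      ∃ j : Nat, queries[j]? = some (q.2, v) ∧ q.1 = (j : Int) := by
  rw [qmapA_getD]
  simp only [List.mem_map, List.mem_filter]
  constructor
  · rintro ⟨⟨i1, a1, b1⟩, ⟨hmem, hbeq⟩, rfl⟩
    rw [enumerate_mem queries 0 (i1, a1, b1)] at hmem
    obtain ⟨j, hj, hp1⟩ := hmem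
    simp only at hj hp1 hbeq ⊢
    have hbv : b1 = v := by simpa using hbeq
    exact ⟨j, by rw [hj, hbv], by omega⟩
  · rintro ⟨j, hj, hq1⟩
    refine ⟨(q.1, (q.2, v)), ⟨?_, by simp⟩, by simp⟩
    rw [enumerate_mem queries 0 ((q.1, (q.2, v)) : Int × (Int × Int))]
    exact ⟨j, by simpa using hj, by omega⟩

-- the answering fold at one node, pointwise
lemma ansfold (cur : PySem.Set Int) :
    ∀ (Q : List (Int × Int)) (ans : List Int), (∀ p ∈ Q, p.1.toNat < ans.length) →
      (Q.foldl (fun a p => if PySem.Set.contains cur p.2 then a.set p.1.toNat 1 else a) ans).length = ans.length ∧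
      ∀ j : Nat,
        ((∃ p ∈ Q, p.1.toNat = j ∧ p.2 ∈ cur) →
          (Q.foldl (fun a p => if PySem.Set.contains cur p.2 then a.set p.1.toNat 1 else a) ans).getD j 0 = 1) ∧
        (¬ (∃ p ∈ Q, p.1.toNat = j ∧ p.2 ∈ cur) →
          (Q.foldl (fun a p => if PySem.Set.contains cur p.2 then a.set p.1.toNat 1 else a) ans).getD j 0 = ans.getD j 0) := by
  intro Q
  induction Q with
  | nil => intro ans _; simp
  | cons q Q ih =>
    intro ans hlt
    have hq := hlt q (List.mem_cons_self)
    by_cases hc : q.2 ∈ cur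
    · have hcb : PySem.Set.contains cur q.2 = true := (PySem.Set.contains_iff cur q.2).mpr hc
      have hstep : (fun a (p : Int × Int) => if PySem.Set.contains cur p.2 then a.set p.1.toNat 1 else a) ans q
          = ans.set q.1.toNat 1 := by simp only [hcb, if_true]
      have hlen' : (ans.set q.1.toNat 1).length = ans.length := by simp
      obtain ⟨ihl, ihp⟩ := ih (ans.set q.1.toNat 1)
        (fun p hp => by rw [hlen']; exact hlt p (List.mem_cons_of_mem q hp))
      simp only [List.foldl_cons, hstep]
      refine ⟨by rw [ihl, hlen'], fun j => ⟨?_, ?_⟩⟩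
      · rintro ⟨p, hp, hpj, hpc⟩
        rcases List.mem_cons.mp hp with rfl | hp'
        · by_cases hex : ∃ p ∈ Q, p.1.toNat = j ∧ p.2 ∈ cur
          · exact (ihp j).1 hex
          · rw [(ihp j).2 hex, ← hpj, getD_set ans p.1.toNat p.1.toNat 1 0 hq]
            simp
        · exact (ihp j).1 ⟨p, hp', hpj, hpc⟩
      · intro hnex
        have hnex' : ¬ ∃ p ∈ Q, p.1.toNat = j ∧ p.2 ∈ cur := by
          rintro ⟨p, hp, hpj, hpc⟩
          exact hnex ⟨p, List.mem_cons_of_mem q hp, hpj, hpc⟩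
        rw [(ihp j).2 hnex', getD_set ans q.1.toNat j 1 0 hq]
        have : ¬ q.1.toNat = j := by
          intro hj
          exact hnex ⟨q, List.mem_cons_self, hj, hc⟩
        simp [this]
    · have hcb : PySem.Set.contains cur q.2 = false := by
        rcases h : PySem.Set.contains cur q.2 with _ | _
        · rfl
        · exact absurd ((PySem.Set.contains_iff cur q.2).mp h) hc
      have hstep : (fun a (p : Int × Int) => if PySem.Set.contains cur p.2 then a.set p.1.toNat 1 else a) ans q = ans := by
        simp only [hcb]
        simp
      obtain ⟨ihl, ihp⟩ := ih ans (fun p hp => hlt p (List.mem_cons_of_mem q hp))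
      simp only [List.foldl_cons, hstep]
      refine ⟨ihl, fun j => ⟨?_, ?_⟩⟩
      · rintro ⟨p, hp, hpj, hpc⟩
        rcases List.mem_cons.mp hp with rfl | hp'
        · exact absurd hpc hc
        · exact (ihp j).1 ⟨p, hp', hpj, hpc⟩
      · intro hnex
        exact (ihp j).2 (by
          rintro ⟨p, hp, hpj, hpc⟩
          exact hnex ⟨p, List.mem_cons_of_mem q hp, hpj, hpc⟩)

lemma discard_add_self (s : PySem.Set Int) (v : Int) (h : v ∉ s) :
    PySem.Set.discard (PySem.Set.add s v) v = s := by
  rw [PySem.Set.add_of_not_mem h]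
  show List.filter _ _ = _
  rw [List.filter_append]
  have h1 : List.filter (fun y => !y == v) [v] = [] := by simp
  rw [h1, List.append_nil]
  apply List.filter_eq_self.mpr
  intro a ha
  simp
  intro hav
  exact absurd (hav ▸ ha) h

lemma HitV_decomp (parent : List Int) (queries : List (Int × Int)) (v : Int) (C : List Int) (j : Nat) :
    HitV parent queries v C j ↔
      (∃ a b, queries[j]? = some (a, b) ∧ b = v ∧ a ∈ C) ∨
      (∃ c, (Nd parent c ∧ peP parent c = v) ∧ HitV parent queries c (v :: C) j) := by
  constructor
  · rintro ⟨a, b, L, hq, hch, hmem⟩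
    rcases Chain_snoc_destruct parent L b v hch with rfl | ⟨c, L', rfl, hch', hc, hpec⟩
    · cases hch
      rcases hmem with hmem | hmem
      · exact Or.inl ⟨a, v, hq, rfl, hmem⟩
      · simp at hmem
    · right
      refine ⟨c, ⟨hc, hpec⟩, a, b, L', hq, hch', ?_⟩
      rcases hmem with hmem | hmem
      · exact Or.inl (List.mem_cons_of_mem v hmem)
      · rcases List.mem_append.mp hmem with hmem | hmem
        · exact Or.inr hmem
        · simp at hmem
          exact Or.inl (hmem ▸ List.mem_cons_self)
  · rintro (⟨a, b, hq, rfl, hmem⟩ | ⟨c, ⟨hc, hpec⟩, a, b, L, hq, hch, hmem⟩)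
    · exact ⟨a, b, [], hq, rfl, Or.inl hmem⟩
    · refine ⟨a, b, L ++ [v], hq, Chain_snoc_build parent L b c v hch hc hpec, ?_⟩
      rcases hmem with hmem | hmem
      · rcases List.mem_cons.mp hmem with rfl | hmem
        · exact Or.inr (by simp)
        · exact Or.inl hmem
      · exact Or.inr (List.mem_append_left _ hmem)

lemma childList_mem (parent : List Int) (c v : Int) :
    c ∈ childList parent v ↔ Nd parent c ∧ peP parent c = v := by
  simp [childList, PySem.List.mem_pyRange_one, Nd]

-- ===== the DFS simulation (A side) =====

def DfsSpec (parent : List Int) (queries : List (Int × Int)) (f : Nat) : Prop :=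
  ∀ (v : Int) (C : List Int) (cur : PySem.Set Int) (ans : List Int),
    RootChain parent v C →
    (∀ x : Int, x ∈ cur ↔ x ∈ C) →
    parent.length - C.length ≤ f →
    ans.length = queries.length →
    (dfsA (treeA parent) (qmapA queries) f v (cur, ans)).1 = cur ∧
    (dfsA (treeA parent) (qmapA queries) f v (cur, ans)).2.length = ans.length ∧
    ∀ j : Nat,
      (HitV parent queries v C j →
        (dfsA (treeA parent) (qmapA queries) f v (cur, ans)).2.getD j 0 = 1) ∧
      (¬ HitV parent queries v C j →
        (dfsA (treeA parent) (qmapA queries) f v (cur, ans)).2.getD j 0 = ans.getD j 0)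

lemma dfs_correct (parent : List Int) (queries : List (Int × Int)) (hp : Pre_solve parent queries) :
    ∀ f : Nat, DfsSpec parent queries f := by
  intro f
  induction f with
  | zero =>
    intro v C cur ans hRC hcur hf hlen
    exfalso
    have hnd := RootChain_nodup parent C v hRC
    have hb := nodup_valid_length parent (v :: C) hnd (by simp)
      (fun x hx => RootChain_mem_Nd parent C v x hRC hx)
    simp at hb
    omega
  | succ f ih =>
    intro v C cur ans hRC hcur hf hlen
    have hNdv : Nd parent v := RootChain_Nd parent v C hRC
    have hnd := RootChain_nodup parent C v hRC
    have hbound := nodup_valid_length parent (v :: C) hnd (by simp)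
      (fun x hx => RootChain_mem_Nd parent C v x hRC hx)
    simp only [List.length_cons] at hbound
    have hans1 : (match (qmapA queries).get? v with
        | some l => l.foldl (fun a p => if PySem.Set.contains cur p.2 then a.set p.1.toNat 1 else a) ans
        | none => ans)
        = ((qmapA queries).getD v []).foldl (fun a p => if PySem.Set.contains cur p.2 then a.set p.1.toNat 1 else a) ans := by
      rcases h : (qmapA queries).get? v with _ | l
      · rw [PySem.Dict.getD_eq_get?_getD, h]
        simp
      · rw [PySem.Dict.getD_eq_get?_getD, h]
        simp
    set ans1 := ((qmapA queries).getD v []).foldl (fun a p => if PySem.Set.contains cur p.2 then a.set p.1.toNat 1 else a) ans with hA1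
    have hQlt : ∀ p ∈ (qmapA queries).getD v [], p.1.toNat < ans.length := by
      intro p hp
      obtain ⟨j, hj, hp1⟩ := (qlist_mem queries v p).mp hp
      have : j < queries.length := by
        by_contra hge
        rw [List.getElem?_eq_none (by omega)] at hj
        cases hj
      omega
    obtain ⟨hA1len, hA1pt⟩ := ansfold cur ((qmapA queries).getD v []) ans hQlt
    rw [← hA1] at hA1len hA1pt
    have hcond0 : ∀ j : Nat, (∃ p ∈ (qmapA queries).getD v [], p.1.toNat = j ∧ p.2 ∈ cur) ↔
        (∃ a b, queries[j]? = some (a, b) ∧ b = v ∧ a ∈ C) := by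
      intro j
      constructor
      · rintro ⟨p, hp, hpj, hpc⟩
        obtain ⟨j', hj', hp1⟩ := (qlist_mem queries v p).mp hp
        have hjj : j' = j := by omega
        subst hjj
        exact ⟨p.2, v, hj', rfl, (hcur p.2).mp hpc⟩
      · rintro ⟨a, b, hj, hbv, haC⟩
        rw [hbv] at hj
        refine ⟨((j : Int), a), ?_, by simp, (hcur a).mpr haC⟩
        exact (qlist_mem queries v ((j : Int), a)).mpr ⟨j, by simpa using hj, rfl⟩
    have hch : PySem.List.pyGetD (treeA parent) v [] = childList parent v :=
      treeA_get parent queries hp v (by exact le_trans (by norm_num) hNdv.1) hNdv.2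
    set cur1 := PySem.Set.add cur v with hcur1def
    have hvnotincur : v ∉ cur := fun hv => RootChain_not_mem parent v C hRC ((hcur v).mp hv)
    have hcur1 : ∀ x : Int, x ∈ cur1 ↔ x ∈ v :: C := by
      intro x
      rw [hcur1def, PySem.Set.mem_add, List.mem_cons, hcur x]
      tauto
    have hfold : ∀ L : List Int, (∀ c ∈ L, Nd parent c ∧ peP parent c = v) →
        ∀ a1 : List Int, a1.length = queries.length →
        (L.foldl (fun s c => dfsA (treeA parent) (qmapA queries) f c s) (cur1, a1)).1 = cur1 ∧
        (L.foldl (fun s c => dfsA (treeA parent) (qmapA queries) f c s) (cur1, a1)).2.length = a1.length ∧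
        ∀ j : Nat,
          ((∃ c ∈ L, HitV parent queries c (v :: C) j) →
            (L.foldl (fun s c => dfsA (treeA parent) (qmapA queries) f c s) (cur1, a1)).2.getD j 0 = 1) ∧
          (¬ (∃ c ∈ L, HitV parent queries c (v :: C) j) →
            (L.foldl (fun s c => dfsA (treeA parent) (qmapA queries) f c s) (cur1, a1)).2.getD j 0 = a1.getD j 0) := by
      intro L
      induction L with
      | nil => intro _ a1 _; simp
      | cons c L ihL =>
        intro hLm a1 hlen1
        obtain ⟨hNdc, hpec⟩ := hLm c (List.mem_cons_self)
        have hRCc : RootChain parent c (v :: C) := ⟨hNdc, hpec, hRC⟩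
        obtain ⟨hc1, hc2, hc3⟩ := ih c (v :: C) cur1 a1 hRCc hcur1 (by simp only [List.length_cons]; omega) hlen1
        have hpair : dfsA (treeA parent) (qmapA queries) f c (cur1, a1)
            = (cur1, (dfsA (treeA parent) (qmapA queries) f c (cur1, a1)).2) := by
          exact Prod.ext_iff.mpr ⟨hc1, rfl⟩
        obtain ⟨ih1, ih2, ih3⟩ := ihL (fun x hx => hLm x (List.mem_cons_of_mem c hx))
          (dfsA (treeA parent) (qmapA queries) f c (cur1, a1)).2 (by rw [hc2, hlen1])
        rw [List.foldl_cons]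
        rw [hpair] at ih1 ih2 ih3 ⊢
        refine ⟨ih1, by rw [ih2, hc2], fun j => ⟨?_, ?_⟩⟩
        · rintro ⟨c', hc', hhit⟩
          rcases List.mem_cons.mp hc' with rfl | hmem
          · by_cases hex : ∃ x ∈ L, HitV parent queries x (v :: C) j
            · exact (ih3 j).1 hex
            · rw [(ih3 j).2 hex]
              exact (hc3 j).1 hhit
          · exact (ih3 j).1 ⟨c', hmem, hhit⟩
        · intro hnex
          have h1 : ¬ ∃ x ∈ L, HitV parent queries x (v :: C) j := by
            rintro ⟨x, hx, hhx⟩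
            exact hnex ⟨x, List.mem_cons_of_mem c hx, hhx⟩
          have h2 : ¬ HitV parent queries c (v :: C) j := by
            intro hh
            exact hnex ⟨c, List.mem_cons_self, hh⟩
          rw [(ih3 j).2 h1, (hc3 j).2 h2]
    have hchildmem : ∀ c ∈ childList parent v, Nd parent c ∧ peP parent c = v :=
      fun c hc => (childList_mem parent c v).mp hc
    obtain ⟨hf1, hf2, hf3⟩ := hfold (childList parent v) hchildmem ans1 (by rw [hA1len, hlen])
    have hunf : dfsA (treeA parent) (qmapA queries) (f + 1) v (cur, ans)
        = (PySem.Set.discard ((childList parent v).foldl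
              (fun s c => dfsA (treeA parent) (qmapA queries) f c s) (cur1, ans1)).1 v,
           ((childList parent v).foldl
              (fun s c => dfsA (treeA parent) (qmapA queries) f c s) (cur1, ans1)).2) := by
      simp only [dfsA]
      rw [hans1, hch]
    rw [hunf, hf1]
    refine ⟨discard_add_self cur v hvnotincur, by rw [hf2, hA1len], fun j => ⟨?_, ?_⟩⟩
    · intro hhit
      rcases (HitV_decomp parent queries v C j).mp hhit with h0 | ⟨c, hcprop, hhc⟩
      · by_cases hex : ∃ c ∈ childList parent v, HitV parent queries c (v :: C) j
        · exact (hf3 j).1 hex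
        · rw [(hf3 j).2 hex]
          exact (hA1pt j).1 ((hcond0 j).mpr h0)
      · exact (hf3 j).1 ⟨c, (childList_mem parent c v).mpr hcprop, hhc⟩
    · intro hnh
      have h0 : ¬ ∃ c ∈ childList parent v, HitV parent queries c (v :: C) j := by
        rintro ⟨c, hcmem, hhc⟩
        exact hnh ((HitV_decomp parent queries v C j).mpr
          (Or.inr ⟨c, (childList_mem parent c v).mp hcmem, hhc⟩))
      have h1 : ¬ ∃ p ∈ (qmapA queries).getD v [], p.1.toNat = j ∧ p.2 ∈ cur := by
        intro hx
        exact hnh ((HitV_decomp parent queries v C j).mpr (Or.inl ((hcond0 j).mp hx)))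
      rw [(hf3 j).2 h0, (hA1pt j).2 h1]

lemma roots_fold (parent : List Int) (queries : List (Int × Int)) (hp : Pre_solve parent queries) :
    ∀ (L : List Int), (∀ r ∈ L, Nd parent r) →
    ∀ (ans : List Int), ans.length = queries.length →
      ((L.foldl
        (fun st node => if PySem.List.pyGetD parent node 0 = 0 then dfsA (treeA parent) (qmapA queries) parent.length node st else st)
        (([] : PySem.Set Int), ans)).1 = ([] : PySem.Set Int)) ∧
      ((L.foldl
        (fun st node => if PySem.List.pyGetD parent node 0 = 0 then dfsA (treeA parent) (qmapA queries) parent.length node st else st)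
        (([] : PySem.Set Int), ans)).2.length = ans.length) ∧
      ∀ j : Nat,
        ((∃ r ∈ L, rawP parent r = 0 ∧ HitV parent queries r [] j) →
          ((L.foldl (fun st node => if PySem.List.pyGetD parent node 0 = 0 then dfsA (treeA parent) (qmapA queries) parent.length node st else st) (([] : PySem.Set Int), ans)).2.getD j 0 = 1)) ∧
        (¬ (∃ r ∈ L, rawP parent r = 0 ∧ HitV parent queries r [] j) →
          ((L.foldl (fun st node => if PySem.List.pyGetD parent node 0 = 0 then dfsA (treeA parent) (qmapA queries) parent.length node st else st) (([] : PySem.Set Int), ans)).2.getD j 0 = ans.getD j 0)) := by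
  intro L
  induction L with
  | nil => intro _ ans _; simp
  | cons r L ihL =>
    intro hL ans hlen
    have hNdr : Nd parent r := hL r (List.mem_cons_self)
    by_cases hr : PySem.List.pyGetD parent r 0 = 0
    · have hRCr : RootChain parent r [] := ⟨hNdr, hr⟩
      obtain ⟨hc1, hc2, hc3⟩ := dfs_correct parent queries hp parent.length r []
        ([] : PySem.Set Int) ans hRCr (by simp) (by simp) hlen
      have hpair : dfsA (treeA parent) (qmapA queries) parent.length r (([] : PySem.Set Int), ans)
          = (([] : PySem.Set Int), (dfsA (treeA parent) (qmapA queries) parent.length r (([] : PySem.Set Int), ans)).2) :=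
        Prod.ext_iff.mpr ⟨hc1, rfl⟩
      obtain ⟨ih1, ih2, ih3⟩ := ihL (fun x hx => hL x (List.mem_cons_of_mem r hx))
        (dfsA (treeA parent) (qmapA queries) parent.length r (([] : PySem.Set Int), ans)).2
        (by rw [hc2, hlen])
      rw [List.foldl_cons, if_pos hr, hpair]
      refine ⟨ih1, by rw [ih2, hc2], fun j => ⟨?_, ?_⟩⟩
      · rintro ⟨r', hr', hraw', hhit'⟩
        rcases List.mem_cons.mp hr' with rfl | hmem
        · by_cases hex : ∃ x ∈ L, rawP parent x = 0 ∧ HitV parent queries x [] j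
          · exact (ih3 j).1 hex
          · rw [(ih3 j).2 hex]
            exact (hc3 j).1 hhit'
        · exact (ih3 j).1 ⟨r', hmem, hraw', hhit'⟩
      · intro hnex
        have h1 : ¬ ∃ x ∈ L, rawP parent x = 0 ∧ HitV parent queries x [] j := by
          rintro ⟨x, hx, hxa, hxb⟩
          exact hnex ⟨x, List.mem_cons_of_mem r hx, hxa, hxb⟩
        have h2 : ¬ HitV parent queries r [] j := by
          intro hh
          exact hnex ⟨r, List.mem_cons_self, hr, hh⟩
        rw [(ih3 j).2 h1, (hc3 j).2 h2]
    · obtain ⟨ih1, ih2, ih3⟩ := ihL (fun x hx => hL x (List.mem_cons_of_mem r hx)) ans hlen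
      rw [List.foldl_cons, if_neg hr]
      refine ⟨ih1, ih2, fun j => ⟨?_, ?_⟩⟩
      · rintro ⟨r', hr', hraw', hhit'⟩
        rcases List.mem_cons.mp hr' with rfl | hmem
        · exact absurd hraw' hr
        · exact (ih3 j).1 ⟨r', hmem, hraw', hhit'⟩
      · intro hnex
        exact (ih3 j).2 (by
          rintro ⟨x, hx, hxa, hxb⟩
          exact hnex ⟨x, List.mem_cons_of_mem r hx, hxa, hxb⟩)

-- ===== the DFS simulation (B side) =====

lemma childrenB_eq_treeA (parent : List Int) : childrenB parent = treeA parent := rfl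

-- x lies in the subtree rooted at v
def SubV (parent : List Int) (x v : Int) : Prop := ∃ L, Chain parent x L v

-- a is in the unique root chain of b (QAp) — closure under chain decomposition
lemma QAp_iff_mem (parent : List Int) (b : Int) (C : List Int) (hRC : RootChain parent b C)
    (a : Int) : QAp parent a b ↔ a ∈ C := by
  constructor
  · rintro ⟨C', hRC', ha⟩
    rwa [RootChain_unique parent C' C b hRC' hRC] at ha
  · intro ha
    exact ⟨C, hRC, ha⟩

lemma not_SubV_self_child (parent : List Int) (v c : Int) (C : List Int)
    (hRC : RootChain parent v C) (hNdc : Nd parent c) (hpec : peP parent c = v) :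
    ¬ SubV parent v c := by
  rintro ⟨L, hch⟩
  have h1 : Chain parent v (L ++ [v]) v := Chain_snoc_build parent L v c v hch hNdc hpec
  have h2 : RootChain parent v ((L ++ [v]) ++ C) := Chain_append_RootChain parent _ v v C h1 hRC
  have := RootChain_unique parent ((L ++ [v]) ++ C) C v h2 hRC
  have hl : ((L ++ [v]) ++ C).length = C.length := by rw [this]
  simp at hl
  omega

def DfsBSpec (parent : List Int) (queries : List (Int × Int)) (f : Nat) : Prop :=
  ∀ (v : Int) (C : List Int) (anc : PySem.Set Int) (d : PySem.Dict Int (PySem.Set Int)),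
    RootChain parent v C →
    (∀ y : Int, y ∈ anc ↔ y ∈ C) →
    parent.length - C.length ≤ f →
    ∀ x : Int,
      (SubV parent x v →
        ∃ s, (dfsB (treeA parent) f v anc d).get? x = some s ∧ ∀ y, (y ∈ s ↔ QAp parent y x)) ∧
      (¬ SubV parent x v → (dfsB (treeA parent) f v anc d).get? x = d.get? x)

lemma dfsB_correct (parent : List Int) (queries : List (Int × Int)) (hp : Pre_solve parent queries) :
    ∀ f : Nat, DfsBSpec parent queries f := by
  intro f
  induction f with
  | zero =>
    intro v C anc d hRC hanc hf x
    exfalso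
    have hnd := RootChain_nodup parent C v hRC
    have hb := nodup_valid_length parent (v :: C) hnd (by simp)
      (fun x hx => RootChain_mem_Nd parent C v x hRC hx)
    simp at hb
    omega
  | succ f ih =>
    intro v C anc d hRC hanc hf x
    have hNdv : Nd parent v := RootChain_Nd parent v C hRC
    have hnd := RootChain_nodup parent C v hRC
    have hbound := nodup_valid_length parent (v :: C) hnd (by simp)
      (fun x hx => RootChain_mem_Nd parent C v x hRC hx)
    simp only [List.length_cons] at hbound
    have hch : PySem.List.pyGetD (treeA parent) v [] = childList parent v :=
      treeA_get parent queries hp v (by exact le_trans (by norm_num) hNdv.1) hNdv.2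
    set anc1 := PySem.Set.union anc [v] with hanc1def
    have hanc1 : ∀ y : Int, y ∈ anc1 ↔ y ∈ v :: C := by
      intro y
      rw [hanc1def, PySem.Set.mem_union, List.mem_cons, hanc y]
      simp
      tauto
    have hunf : dfsB (treeA parent) (f + 1) v anc d
        = (childList parent v).foldl (fun dd c => dfsB (treeA parent) f c anc1 dd) (d.insert v anc) := by
      simp only [dfsB]
      rw [hch]
    have hfold : ∀ L : List Int, (∀ c ∈ L, Nd parent c ∧ peP parent c = v) →
        ∀ dd : PySem.Dict Int (PySem.Set Int), ∀ x : Int,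
          ((∃ c ∈ L, SubV parent x c) →
            ∃ s, (L.foldl (fun dd c => dfsB (treeA parent) f c anc1 dd) dd).get? x = some s ∧
              ∀ y, (y ∈ s ↔ QAp parent y x)) ∧
          (¬ (∃ c ∈ L, SubV parent x c) →
            (L.foldl (fun dd c => dfsB (treeA parent) f c anc1 dd) dd).get? x = dd.get? x) := by
      intro L
      induction L with
      | nil => intro _ dd x; simp
      | cons c L ihL =>
        intro hLm dd x
        obtain ⟨hNdc, hpec⟩ := hLm c (List.mem_cons_self)
        have hRCc : RootChain parent c (v :: C) := ⟨hNdc, hpec, hRC⟩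
        have hc := ih c (v :: C) anc1 dd hRCc hanc1 (by simp only [List.length_cons]; omega)
        obtain ⟨ihpos, ihneg⟩ := ihL (fun y hy => hLm y (List.mem_cons_of_mem c hy))
          (dfsB (treeA parent) f c anc1 dd) x
        rw [List.foldl_cons]
        refine ⟨?_, ?_⟩
        · rintro ⟨c', hc', hsub⟩
          rcases List.mem_cons.mp hc' with rfl | hmem
          · by_cases hex : ∃ c0 ∈ L, SubV parent x c0
            · exact ihpos hex
            · rw [ihneg hex]
              exact (hc x).1 hsub
          · exact ihpos ⟨c', hmem, hsub⟩
        · intro hnex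
          have h1 : ¬ ∃ c0 ∈ L, SubV parent x c0 := by
            rintro ⟨c0, hc0, hs⟩
            exact hnex ⟨c0, List.mem_cons_of_mem c hc0, hs⟩
          have h2 : ¬ SubV parent x c := fun hs => hnex ⟨c, List.mem_cons_self, hs⟩
          rw [ihneg h1, (hc x).2 h2]
    have hchildmem : ∀ c ∈ childList parent v, Nd parent c ∧ peP parent c = v :=
      fun c hc => (childList_mem parent c v).mp hc
    rw [hunf]
    constructor
    · rintro ⟨L, hchx⟩
      rcases Chain_snoc_destruct parent L x v hchx with rfl | ⟨c, L', rfl, hch', hc', hpec'⟩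
      · -- x = v
        cases hchx
        have hnsub : ¬ ∃ c ∈ childList parent v, SubV parent v c := by
          rintro ⟨c, hcmem, hsub⟩
          obtain ⟨hNdc, hpec⟩ := (childList_mem parent c v).mp hcmem
          exact not_SubV_self_child parent v c C hRC hNdc hpec hsub
        rw [(hfold (childList parent v) hchildmem (d.insert v anc) v).2 hnsub]
        refine ⟨anc, PySem.Dict.get?_insert_self d v anc, fun y => ?_⟩
        rw [hanc y, QAp_iff_mem parent v C hRC y]
      · -- x in the subtree of child c
        exact (hfold (childList parent v) hchildmem (d.insert v anc) x).1
          ⟨c, (childList_mem parent c v).mpr ⟨hc', hpec'⟩, ⟨L', hch'⟩⟩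
    · intro hns
      have hnsub : ¬ ∃ c ∈ childList parent v, SubV parent x c := by
        rintro ⟨c, hcmem, L', hch'⟩
        obtain ⟨hNdc, hpec⟩ := (childList_mem parent c v).mp hcmem
        exact hns ⟨L' ++ [v], Chain_snoc_build parent L' x c v hch' hNdc hpec⟩
      rw [(hfold (childList parent v) hchildmem (d.insert v anc) x).2 hnsub]
      have hxv : x ≠ v := fun h => hns ⟨[], h⟩
      exact PySem.Dict.get?_insert_of_ne d anc hxv

lemma rootsB_fold (parent : List Int) (queries : List (Int × Int)) (hp : Pre_solve parent queries) :
    ∀ (L : List Int), (∀ r ∈ L, Nd parent r) →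
    ∀ (d : PySem.Dict Int (PySem.Set Int)), ∀ x : Int,
      ((∃ r ∈ L, rawP parent r = 0 ∧ SubV parent x r) →
        ∃ s, (L.foldl
            (fun d r => if PySem.List.pyGetD parent r 0 = 0 then dfsB (treeA parent) parent.length r ([] : PySem.Set Int) d else d)
            d).get? x = some s ∧ ∀ y, (y ∈ s ↔ QAp parent y x)) ∧
      (¬ (∃ r ∈ L, rawP parent r = 0 ∧ SubV parent x r) →
        (L.foldl
            (fun d r => if PySem.List.pyGetD parent r 0 = 0 then dfsB (treeA parent) parent.length r ([] : PySem.Set Int) d else d)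
            d).get? x = d.get? x) := by
  intro L
  induction L with
  | nil => intro _ d x; simp
  | cons r L ihL =>
    intro hL d x
    have hNdr : Nd parent r := hL r (List.mem_cons_self)
    by_cases hr : PySem.List.pyGetD parent r 0 = 0
    · have hRCr : RootChain parent r [] := ⟨hNdr, hr⟩
      have hc := dfsB_correct parent queries hp parent.length r [] ([] : PySem.Set Int) d hRCr
        (by intro y; simp) (by simp) x
      obtain ⟨ihpos, ihneg⟩ := ihL (fun y hy => hL y (List.mem_cons_of_mem r hy))
        (dfsB (treeA parent) parent.length r ([] : PySem.Set Int) d) x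
      rw [List.foldl_cons, if_pos hr]
      refine ⟨?_, ?_⟩
      · rintro ⟨r', hr', hraw', hsub'⟩
        rcases List.mem_cons.mp hr' with rfl | hmem
        · by_cases hex : ∃ r0 ∈ L, rawP parent r0 = 0 ∧ SubV parent x r0
          · exact ihpos hex
          · rw [ihneg hex]
            exact hc.1 hsub'
        · exact ihpos ⟨r', hmem, hraw', hsub'⟩
      · intro hnex
        have h1 : ¬ ∃ r0 ∈ L, rawP parent r0 = 0 ∧ SubV parent x r0 := by
          rintro ⟨r0, hr0, ha, hb⟩
          exact hnex ⟨r0, List.mem_cons_of_mem r hr0, ha, hb⟩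
        have h2 : ¬ SubV parent x r := fun hs => hnex ⟨r, List.mem_cons_self, hr, hs⟩
        rw [ihneg h1, hc.2 h2]
    · obtain ⟨ihpos, ihneg⟩ := ihL (fun y hy => hL y (List.mem_cons_of_mem r hy)) d x
      rw [List.foldl_cons, if_neg hr]
      refine ⟨?_, ?_⟩
      · rintro ⟨r', hr', hraw', hsub'⟩
        rcases List.mem_cons.mp hr' with rfl | hmem
        · exact absurd hraw' hr
        · exact ihpos ⟨r', hmem, hraw', hsub'⟩
      · intro hnex
        exact ihneg (by
          rintro ⟨r0, hr0, ha, hb⟩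
          exact hnex ⟨r0, List.mem_cons_of_mem r hr0, ha, hb⟩)

-- x is visited iff it has a root chain
lemma visited_iff (parent : List Int) (x : Int) :
    (∃ r ∈ PySem.List.pyRange 1 (parent.length : Int) 1, rawP parent r = 0 ∧ SubV parent x r) ↔
      ∃ C, RootChain parent x C := by
  constructor
  · rintro ⟨r, hrmem, hraw, L, hch⟩
    have hNdr : Nd parent r := by
      rw [PySem.List.mem_pyRange_one] at hrmem
      exact hrmem
    exact ⟨L, Chain_Root_to_RootChain parent L x r hch hNdr hraw⟩
  · rintro ⟨C, hRC⟩
    obtain ⟨r, hNdr, hraw, hch⟩ := RootChain_last parent C x hRC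
    refine ⟨r, ?_, hraw, C, hch⟩
    rw [PySem.List.mem_pyRange_one]
    exact hNdr

-- top-level answer characterization for A
lemma top_iff (parent : List Int) (queries : List (Int × Int)) (j : Nat) (a b : Int)
    (hq : queries[j]? = some (a, b)) :
    (∃ r ∈ PySem.List.pyRange 1 (parent.length : Int) 1, rawP parent r = 0 ∧ HitV parent queries r [] j) ↔
      QAp parent a b := by
  constructor
  · rintro ⟨r, hrmem, hraw, a', b', L, hq', hch, hmem⟩
    have hself := hq.symm.trans hq'
    simp only [Option.some.injEq, Prod.mk.injEq] at hself
    obtain ⟨ha, hb⟩ := hself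
    have hNdr : Nd parent r := by
      rw [PySem.List.mem_pyRange_one] at hrmem
      exact hrmem
    have hmem' : a' ∈ L := by
      rcases hmem with h | h
      · simp at h
      · exact h
    refine ⟨L, ?_, ?_⟩
    · rw [hb]; exact Chain_Root_to_RootChain parent L b' r hch hNdr hraw
    · rw [ha]; exact hmem'
  · rintro ⟨C, hRC, haC⟩
    obtain ⟨r, hNdr, hraw, hch⟩ := RootChain_last parent C b hRC
    refine ⟨r, ?_, hraw, a, b, C, hq, hch, Or.inr haC⟩
    rw [PySem.List.mem_pyRange_one]
    exact hNdr

-- ===== VERDICT (by name: the statement is the Claim_ definition above) =====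
theorem solve_spec : Claim_equal_solve := by
  intro parent queries _hdom hp
  simp only [Spec_solve, solve, solve_alt, childrenB_eq_treeA]
  obtain ⟨hr1, hr2, hr3⟩ := roots_fold parent queries hp
    (PySem.List.pyRange 1 (parent.length : Int) 1)
    (fun x hx => by rw [PySem.List.mem_pyRange_one] at hx; exact hx)
    (List.replicate queries.length 0) (by simp)
  apply List.ext_getElem
  · rw [hr2]; simp
  · intro i h1 h2
    have hi : i < queries.length := by simpa using h2
    have hq : queries[i]? = some (queries[i].1, queries[i].2) := by
      rw [List.getElem?_eq_getElem hi]
    have hgetD : ∀ (l : List Int) (hil : i < l.length), l[i] = l.getD i 0 :=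
      fun l hil => (List.getD_eq_getElem l 0 hil).symm
    simp only [List.getElem_map]
    rw [hgetD _ h1]
    have hB := rootsB_fold parent queries hp
      (PySem.List.pyRange 1 (parent.length : Int) 1)
      (fun x hx => by rw [PySem.List.mem_pyRange_one] at hx; exact hx)
      PySem.Dict.empty queries[i].2
    by_cases hvis : ∃ C, RootChain parent queries[i].2 C
    · obtain ⟨s, hget, hmem⟩ := hB.1 ((visited_iff parent queries[i].2).mpr hvis)
      rw [hget]
      by_cases hQA : QAp parent queries[i].1 queries[i].2
      · rw [(hr3 i).1 ((top_iff parent queries i queries[i].1 queries[i].2 hq).mpr hQA)]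
        simp
        exact (hmem queries[i].1).mpr hQA
      · rw [(hr3 i).2 (fun hh => hQA ((top_iff parent queries i queries[i].1 queries[i].2 hq).mp hh))]
        simp [hi]
        exact fun h => hQA ((hmem queries[i].1).mp h)
    · rw [hB.2 (fun hh => hvis ((visited_iff parent queries[i].2).mp hh))]
      have hQA : ¬ QAp parent queries[i].1 queries[i].2 := by
        rintro ⟨C, hRC, _⟩
        exact hvis ⟨C, hRC⟩
      rw [(hr3 i).2 (fun hh => hQA ((top_iff parent queries i queries[i].1 queries[i].2 hq).mp hh))]
      simp [PySem.Dict.get?_empty, hi]
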